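-- pv_equiv track=rewrite | github.com/KenLopez/Proyecto2_LFP | Proyecto2_LFP/ModuloGramatica.py | armarGLC
-- ===== SOURCE A (Python) =====
-- def armarGLC(info):
--     glc = ""
--     listaCarga = []
--     for linea in info:
--         if(linea == "%\n" or linea == "%"):
--             listaCarga.append(glc)
--             glc = ""
--         else:
--             glc += linea
--     return listaCarga
-- ===== SOURCE B (Python) =====
-- def armarGLC(info):
--     lines = list(info)
--     res = []
--     while True:
--         i = next((k for k, l in enumerate(lines) if l == "%\n" or l == "%"), None)
--         if i is None:
--             return res
--         res.append("".join(lines[:i]))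
--         lines = lines[i + 1:]
-- ===== Notes on version B (the rewrite author's own statement) =====
-- stated objective: alternative
-- what changed: Replaces the running-string accumulator fold with a find-next-marker loop that joins the slice before each marker and continues on the remainder after it.
import Mathlib
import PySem

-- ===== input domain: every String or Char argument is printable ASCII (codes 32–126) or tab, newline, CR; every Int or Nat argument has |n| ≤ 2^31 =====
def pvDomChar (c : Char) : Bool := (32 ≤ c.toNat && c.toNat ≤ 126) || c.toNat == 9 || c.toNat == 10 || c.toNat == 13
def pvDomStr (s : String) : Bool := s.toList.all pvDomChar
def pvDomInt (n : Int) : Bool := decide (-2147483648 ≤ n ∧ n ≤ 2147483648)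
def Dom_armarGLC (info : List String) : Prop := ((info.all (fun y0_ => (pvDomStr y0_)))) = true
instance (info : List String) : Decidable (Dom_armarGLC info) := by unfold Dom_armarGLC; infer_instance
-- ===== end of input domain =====

-- ===== PORT A =====
-- B replaces A's running-string accumulator fold with a find-next-marker loop
-- that joins the slice before each marker and recurses on the remainder (alternative decomposition).
def armarGLC (info : List String) : List String :=
  (info.foldl (fun (st : String × List String) linea =>
    if linea == "%\n" || linea == "%" then ("", st.2 ++ [st.1])
    else (st.1 ++ linea, st.2)) ("", [])).2

-- ===== PORT B =====
def pvIsMark (l : String) : Bool := l == "%\n" || l == "%"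

def armarGLC_altGo (lines : List String) : List String :=
  match h : lines.findIdx? pvIsMark with
  | none => []
  | some i => String.join (lines.take i) :: armarGLC_altGo (lines.drop (i + 1))
termination_by lines.length
decreasing_by
  have hi := List.findIdx?_eq_some_iff_findIdx_eq.mp h
  have : i < lines.length := hi.1
  simp [List.length_drop]
  omega

def armarGLC_alt (info : List String) : List String := armarGLC_altGo info

-- ===== PRECONDITION & SPEC =====
def Spec_armarGLC (info : List String) (out : List String) : Prop := out = armarGLC_alt info
instance (info : List String) (out : List String) : Decidable (Spec_armarGLC info out) := by unfold Spec_armarGLC; infer_instance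

-- ===== CLAIM (what is proved, stated in full; the proofs are below) =====
def Claim_equal_armarGLC : Prop := ∀ (info : List String), Dom_armarGLC info → Spec_armarGLC info (armarGLC info)

-- ===== LEMMAS AND PROOFS =====
def pvChunks (glc : String) : List String → List String
  | [] => []
  | l :: ls => if pvIsMark l then glc :: pvChunks "" ls else pvChunks (glc ++ l) ls

theorem pvJoinFrom (xs : List String) : ∀ a : String,
    List.foldl (fun r s => r ++ s) a xs = a ++ List.foldl (fun r s => r ++ s) "" xs := by
  induction xs with
  | nil => intro a; simp
  | cons x xs ih =>
    intro a
    simp only [List.foldl_cons]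
    rw [ih (a ++ x), ih ("" ++ x)]
    simp [String.append_assoc]

theorem pvFoldA (lines : List String) : ∀ (glc : String) (acc : List String),
    (lines.foldl (fun (st : String × List String) linea =>
      if linea == "%\n" || linea == "%" then ("", st.2 ++ [st.1])
      else (st.1 ++ linea, st.2)) (glc, acc)).2 = acc ++ pvChunks glc lines := by
  induction lines with
  | nil => intro glc acc; simp [pvChunks]
  | cons l ls ih =>
    intro glc acc
    have hd : pvIsMark l = (l == "%\n" || l == "%") := rfl
    simp only [List.foldl_cons, pvChunks]
    by_cases h : pvIsMark l = true
    · rw [if_pos (hd ▸ h), if_pos h, ih]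
      simp
    · rw [if_neg (hd ▸ h), if_neg h, ih]

theorem pvChunksGo (lines : List String) : ∀ (glc : String),
    pvChunks glc lines =
      match lines.findIdx? pvIsMark with
      | none => []
      | some i => (glc ++ String.join (lines.take i)) :: armarGLC_altGo (lines.drop (i + 1))
      := by
  induction lines with
  | nil => intro glc; rfl
  | cons l ls ih =>
    intro glc
    by_cases h : pvIsMark l = true
    · simp only [pvChunks, h, if_true, List.findIdx?_cons, ih "", List.take, List.drop]
      rw [armarGLC_altGo]
      cases hf : ls.findIdx? pvIsMark <;> simp [String.join]
    · simp only [pvChunks, h, if_false, Bool.false_eq_true, List.findIdx?_cons, ih (glc ++ l)]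
      cases hf : ls.findIdx? pvIsMark with
      | none => simp
      | some i =>
        have hj : String.join (l :: List.take i ls) = l ++ String.join (List.take i ls) := by
          simp only [String.join, List.foldl_cons]
          rw [pvJoinFrom]
          simp
        simp [hj, String.append_assoc]

-- ===== VERDICT (by name: the statement is the Claim_ definition above) =====
theorem armarGLC_spec : Claim_equal_armarGLC := by
  intro info _
  unfold Spec_armarGLC armarGLC armarGLC_alt
  rw [pvFoldA info "" [], pvChunksGo info ""]
  rw [armarGLC_altGo]
  cases hf : info.findIdx? pvIsMark <;> simp
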